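-- pv_equiv track=rewrite | github.com/Gdsboom/duckduckai_selenium | api_2_1.py | check_punctuation_marks
-- ===== SOURCE A (Python) =====
-- def check_punctuation_marks(text_original):
--     buff_symbol_begin = str()
--     buff_symbol_end = str()
--     for i in text_original:
--         if not ( i.isalpha() ) : #and i!=" "
--             buff_symbol_begin += str(i)
--         else:
--             break
--     for i in text_original[::-1]:
--         if not ( i.isalpha()) : #and i!=" "
--             buff_symbol_end += str(i)
--         else:
--             break
--     return buff_symbol_begin, buff_symbol_end[::-1]
-- ===== SOURCE B (Python) =====
-- def check_punctuation_marks(text_original):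
--     # Find boundary indices, then slice (instead of accumulating characters).
--     n = len(text_original)
--     i = 0
--     while i < n and not text_original[i].isalpha():
--         i += 1
--     k = 0
--     while k < n and not text_original[n - 1 - k].isalpha():
--         k += 1
--     return text_original[:i], text_original[n - k:]
-- ===== Notes on version B (the rewrite author's own statement) =====
-- stated objective: simpler
-- what changed: B finds the index of the first alphabetic character from each end and returns two slices, instead of accumulating characters one by one (with a double reversal for the tail) as A does.
import Mathlib
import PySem

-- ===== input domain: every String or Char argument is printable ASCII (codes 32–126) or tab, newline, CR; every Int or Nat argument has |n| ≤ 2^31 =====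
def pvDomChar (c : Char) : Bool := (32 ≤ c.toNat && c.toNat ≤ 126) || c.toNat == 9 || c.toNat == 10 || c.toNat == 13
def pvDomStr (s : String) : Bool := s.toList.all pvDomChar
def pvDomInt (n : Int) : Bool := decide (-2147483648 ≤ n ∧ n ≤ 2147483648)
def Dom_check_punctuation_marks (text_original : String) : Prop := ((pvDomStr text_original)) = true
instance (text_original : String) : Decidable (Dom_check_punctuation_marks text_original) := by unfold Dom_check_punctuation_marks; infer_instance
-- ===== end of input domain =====

-- B finds the first-alphabetic boundary index from each end and slices; A accumulates characters (reversing the tail twice). Objective: simpler.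

-- ===== PORT A =====
-- A's for-loop with break, accumulating non-alphabetic chars into a growing string (as a char list)
def pvABegin (acc : List Char) : List Char → List Char
  | [] => acc
  | c :: rest => if !(PySem.Chars.isalpha c) then pvABegin (acc ++ [c]) rest else acc

def check_punctuation_marks (text_original : String) : String × String :=
  let buff_symbol_begin := pvABegin [] text_original.toList
  let buff_symbol_end := pvABegin [] text_original.toList.reverse
  (String.mk buff_symbol_begin, String.mk buff_symbol_end.reverse)

-- ===== PORT B =====
-- B's while-loop: index of the first alphabetic character (length if none)
def pvFirstAlphaIdx : List Char → Nat
  | [] => 0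
  | c :: rest => if PySem.Chars.isalpha c then 0 else pvFirstAlphaIdx rest + 1

def check_punctuation_marks_alt (text_original : String) : String × String :=
  let cs := text_original.toList
  let n := cs.length
  let i := pvFirstAlphaIdx cs
  let k := pvFirstAlphaIdx cs.reverse
  (String.mk (cs.take i), String.mk (cs.drop (n - k)))

-- ===== PRECONDITION & SPEC =====
def Spec_check_punctuation_marks (text_original : String) (out : String × String) : Prop := out = check_punctuation_marks_alt text_original
instance (text_original : String) (out : String × String) : Decidable (Spec_check_punctuation_marks text_original out) := by unfold Spec_check_punctuation_marks; infer_instance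

-- ===== CLAIM (what is proved, stated in full; the proofs are below) =====
def Claim_equal_check_punctuation_marks : Prop := ∀ (text_original : String), Dom_check_punctuation_marks text_original → Spec_check_punctuation_marks text_original (check_punctuation_marks text_original)

-- ===== LEMMAS AND PROOFS =====
theorem pvABegin_eq_take (cs : List Char) : ∀ acc, pvABegin acc cs = acc ++ cs.take (pvFirstAlphaIdx cs) := by
  induction cs with
  | nil => intro acc; simp [pvABegin, pvFirstAlphaIdx]
  | cons c rest ih =>
      intro acc
      by_cases h : PySem.Chars.isalpha c = true
      · simp [pvABegin, pvFirstAlphaIdx, h]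
      · simp [pvABegin, pvFirstAlphaIdx, h, ih]

theorem pvFirstAlphaIdx_le (cs : List Char) : pvFirstAlphaIdx cs ≤ cs.length := by
  induction cs with
  | nil => simp [pvFirstAlphaIdx]
  | cons c rest ih =>
      by_cases h : PySem.Chars.isalpha c = true <;> simp [pvFirstAlphaIdx, h] <;> omega

-- ===== VERDICT (by name: the statement is the Claim_ definition above) =====
theorem check_punctuation_marks_spec : Claim_equal_check_punctuation_marks := by
  intro t _
  unfold Spec_check_punctuation_marks check_punctuation_marks check_punctuation_marks_alt
  simp only [pvABegin_eq_take, List.nil_append]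
  refine Prod.ext rfl ?_
  have hk := pvFirstAlphaIdx_le t.toList.reverse
  simp only []
  congr 1
  rw [List.take_reverse, List.reverse_reverse]
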